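-- pv_equiv track=rewrite | github.com/miloszchodan/Learning-Python | Projekty/Lab11/2019-IAD-11.py | zlacz_posortowane
-- ===== SOURCE A (Python) =====
-- def zlacz_posortowane(x):
--     y = []
--     for i in range(len(x)):
--         licznik = 0
--         while True:
--             if licznik == len(x[i]):
--                 break
--             else:
--                 y.append(x[i][licznik])
--                 licznik += 1
--     for i in range(len(y)):
--         for j in range(len(y) - i - 1):
--             if y[j] > y[j + 1]:
--                 y[j], y[j + 1] = y[j + 1], y[j]
--     return y
-- ===== SOURCE B (Python) =====
-- def _merge(u, v):
--     res = []
--     i = j = 0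
--     while i < len(u) and j < len(v):
--         if u[i] <= v[j]:
--             res.append(u[i]); i += 1
--         else:
--             res.append(v[j]); j += 1
--     return res + u[i:] + v[j:]
--
-- def _msort(l):
--     if len(l) <= 1:
--         return l
--     mid = len(l) // 2
--     return _merge(_msort(l[:mid]), _msort(l[mid:]))
--
-- def zlacz_posortowane(x):
--     y = [v for row in x for v in row]
--     return _msort(y)
-- ===== Notes on version B (the rewrite author's own statement) =====
-- stated objective: faster
-- what changed: Flattening stays a single comprehension pass, but the in-place bubble sort (nested index loops with adjacent swaps) is replaced by a top-down stable merge sort (split in halves, recurse, merge taking the left element on ties).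
import Mathlib
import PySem

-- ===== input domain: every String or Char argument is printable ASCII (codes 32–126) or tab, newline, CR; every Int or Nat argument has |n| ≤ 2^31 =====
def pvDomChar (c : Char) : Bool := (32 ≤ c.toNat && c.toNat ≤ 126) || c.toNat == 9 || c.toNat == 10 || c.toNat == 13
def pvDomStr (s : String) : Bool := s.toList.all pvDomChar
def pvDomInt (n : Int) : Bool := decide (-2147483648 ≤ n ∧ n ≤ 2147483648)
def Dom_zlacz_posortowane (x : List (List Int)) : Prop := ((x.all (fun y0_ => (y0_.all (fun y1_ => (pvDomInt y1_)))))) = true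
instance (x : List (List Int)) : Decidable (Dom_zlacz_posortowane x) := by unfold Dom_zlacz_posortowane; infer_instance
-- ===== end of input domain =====

-- B replaces A's in-place bubble sort with a top-down stable merge sort over the same flattened list (faster: O(n log n) vs O(n^2)).

-- ===== PORT A =====
-- inner 'while True' loop: appends x[i][licznik] to y one element at a time
def innerA (acc : List Int) (row : List Int) : List Int :=
  match row with
  | [] => acc
  | v :: r => innerA (acc ++ [v]) r

-- inner 'for j in range(len(y)-i-1)' loop: k conditional adjacent swaps from the front
def bpass : List Int → Nat → List Int
  | l, 0 => l
  | a :: b :: t, Nat.succ k => if a > b then b :: bpass (a :: t) k else a :: bpass (b :: t) k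
  | l, Nat.succ _ => l

def zlacz_posortowane (x : List (List Int)) : List Int :=
  let y := x.foldl (fun acc row => innerA acc row) []
  (List.range y.length).foldl (fun z i => bpass z (z.length - i - 1)) y

-- ===== PORT B =====
-- merge loop of Source B: repeatedly take the smaller front element, left on ties
def mergeB : List Int → List Int → List Int
  | [], v => v
  | u, [] => u
  | a :: u, b :: v => if a ≤ b then a :: mergeB u (b :: v) else b :: mergeB (a :: u) v
termination_by u v => u.length + v.length

def msortB (l : List Int) : List Int :=
  if l.length ≤ 1 then l
  else mergeB (msortB (l.take (l.length / 2))) (msortB (l.drop (l.length / 2)))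
termination_by l.length
decreasing_by
  · simp [List.length_take]; omega
  · simp [List.length_drop]; omega

def zlacz_posortowane_alt (x : List (List Int)) : List Int :=
  msortB (x.flatMap (fun row => row))

-- ===== PRECONDITION & SPEC =====
def Spec_zlacz_posortowane (x : List (List Int)) (out : List Int) : Prop := out = zlacz_posortowane_alt x
instance (x : List (List Int)) (out : List Int) : Decidable (Spec_zlacz_posortowane x out) := by unfold Spec_zlacz_posortowane; infer_instance

-- ===== CLAIM (what is proved, stated in full; the proofs are below) =====
def Claim_equal_zlacz_posortowane : Prop := ∀ (x : List (List Int)), Dom_zlacz_posortowane x → Spec_zlacz_posortowane x (zlacz_posortowane x)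

-- ===== LEMMAS AND PROOFS =====

theorem innerA_eq (row acc : List Int) : innerA acc row = acc ++ row := by
  induction row generalizing acc with
  | nil => simp [innerA]
  | cons v r ih => simp [innerA, ih]

theorem flattenA_eq (x : List (List Int)) (acc : List Int) :
    x.foldl (fun acc row => innerA acc row) acc = acc ++ x.flatMap (fun r => r) := by
  induction x generalizing acc with
  | nil => simp
  | cons r t ih =>
      simp only [List.foldl_cons]
      rw [innerA_eq, ih]
      simp

theorem bpass_append (k : Nat) (u v : List Int) (h : u.length = k + 1) :
    bpass (u ++ v) k = bpass u k ++ v := by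
  induction k generalizing u v with
  | zero =>
      match u, h with
      | [a], _ => simp [bpass]
  | succ k ih =>
      match u, h with
      | a :: b :: t, h =>
        have ht : (a :: t).length = k + 1 := by simpa using h
        have hbt : (b :: t).length = k + 1 := by simpa using h
        by_cases hab : a > b
        · simp only [List.cons_append, bpass, if_pos hab]
          rw [show a :: (t ++ v) = (a :: t) ++ v from rfl, ih _ v ht]
        · simp only [List.cons_append, bpass, if_neg hab]
          rw [show b :: (t ++ v) = (b :: t) ++ v from rfl, ih _ v hbt]

theorem bpass_full (u : List Int) (a : Int) :
    ∃ p m, bpass (a :: u) u.length = p ++ [m] ∧ (p ++ [m]).Perm (a :: u) ∧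
      ∀ x ∈ a :: u, x ≤ m := by
  induction u generalizing a with
  | nil =>
      refine ⟨[], a, by simp [bpass], by simp, ?_⟩
      intro x hx; simp at hx; omega
  | cons b t ih =>
      by_cases hab : a > b
      · obtain ⟨p, m, he, hp, hb⟩ := ih a
        refine ⟨b :: p, m, ?_, ?_, ?_⟩
        · simp only [List.length_cons, bpass, if_pos hab]
          rw [he]; rfl
        · have h1 : ((b :: p) ++ [m]).Perm (b :: a :: t) := by simpa using hp.cons b
          exact h1.trans (List.Perm.swap a b t)
        · intro w hw
          simp only [List.mem_cons] at hw
          rcases hw with rfl | rfl | hw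
          · exact hb w (by simp)
          · exact le_trans (le_of_lt hab) (hb a (by simp))
          · exact hb w (by simp [hw])
      · obtain ⟨p, m, he, hp, hb⟩ := ih b
        refine ⟨a :: p, m, ?_, ?_, ?_⟩
        · simp only [List.length_cons, bpass, if_neg hab]
          rw [he]; rfl
        · exact hp.cons a
        · intro w hw
          simp only [List.mem_cons] at hw
          rcases hw with rfl | hw
          · exact le_trans (by omega) (hb b (by simp))
          · exact hb w (by simpa using hw)

theorem loop_inv (k : Nat) : ∀ (z : List Int) (n : Nat), z.length = n → k ≤ n →
    (z.drop k).Sorted (· ≤ ·) → (∀ a ∈ z.take k, ∀ b ∈ z.drop k, a ≤ b) →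
    ((List.range' (n - k) k).foldl (fun z j => bpass z (z.length - j - 1)) z).Perm z ∧
    ((List.range' (n - k) k).foldl (fun z j => bpass z (z.length - j - 1)) z).Sorted (· ≤ ·) := by
  induction k with
  | zero =>
      intro z n hz hk hs hb
      simpa using hs
  | succ k ih =>
      intro z n hz hk hs hb
      have hrange : List.range' (n - (k + 1)) (k + 1) = (n - k - 1) :: List.range' (n - k) k := by
        rw [List.range'_succ, show n - (k + 1) + 1 = n - k from by omega,
          show n - (k + 1) = n - k - 1 from by omega]
      rw [hrange]
      simp only [List.foldl_cons]
      have hfuel : z.length - (n - k - 1) - 1 = k := by omega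
      rw [hfuel]
      have hzsplit : z = z.take (k + 1) ++ z.drop (k + 1) := (List.take_append_drop _ _).symm
      have htl : (z.take (k + 1)).length = k + 1 := by rw [List.length_take]; omega
      obtain ⟨a, u, hu⟩ : ∃ a u, z.take (k + 1) = a :: u := by
        cases h : z.take (k + 1) with
        | nil => rw [h] at htl; simp at htl
        | cons a u => exact ⟨a, u, rfl⟩
      have hul : u.length = k := by rw [hu] at htl; simpa using htl
      obtain ⟨p, m, he, hperm, hmax⟩ := bpass_full u a
      have hstep : bpass z k = (p ++ [m]) ++ z.drop (k + 1) := by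
        conv_lhs => rw [hzsplit, hu]
        rw [bpass_append k (a :: u) (z.drop (k + 1)) (by simp [hul]), ← hul, he]
      rw [hstep]
      have hpl : p.length = k := by
        have := hperm.length_eq; simp at this; omega
      have hmem_take : ∀ x, x ∈ p ++ [m] → x ∈ z.take (k + 1) := by
        intro x hx; rw [hu]; exact hperm.mem_iff.mp hx
      have hzl' : ((p ++ [m]) ++ z.drop (k + 1)).length = n := by
        simp [hpl]; omega
      have hdrop' : ((p ++ [m]) ++ z.drop (k + 1)).drop k = m :: z.drop (k + 1) := by
        rw [List.append_assoc, ← hpl, List.drop_left]; rfl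
      have htake' : ((p ++ [m]) ++ z.drop (k + 1)).take k = p := by
        rw [List.append_assoc, ← hpl, List.take_left]
      have hsorted' : (((p ++ [m]) ++ z.drop (k + 1)).drop k).Sorted (· ≤ ·) := by
        rw [hdrop', List.sorted_cons]
        refine ⟨?_, hs⟩
        intro b hbmem
        exact hb m (hmem_take m (by simp)) b hbmem
      have hbound' : ∀ a' ∈ ((p ++ [m]) ++ z.drop (k + 1)).take k,
          ∀ b ∈ ((p ++ [m]) ++ z.drop (k + 1)).drop k, a' ≤ b := by
        rw [htake', hdrop']
        intro a' ha' b hbmem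
        simp only [List.mem_cons] at hbmem
        rcases hbmem with rfl | hbmem
        · have : a' ∈ a :: u := by
            have := hmem_take a' (by simp [ha'])
            rwa [hu] at this
          exact hmax a' this
        · exact hb a' (hmem_take a' (by simp [ha'])) b hbmem
      obtain ⟨hP, hS⟩ := ih ((p ++ [m]) ++ z.drop (k + 1)) n hzl' (by omega) hsorted' hbound'
      refine ⟨hP.trans ?_, hS⟩
      have h2 : ((p ++ [m]) ++ z.drop (k + 1)).Perm (z.take (k + 1) ++ z.drop (k + 1)) := by
        rw [hu]; exact hperm.append_right _
      rw [← hzsplit] at h2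
      exact h2

theorem bubble_sorts (y : List Int) :
    ((List.range y.length).foldl (fun z i => bpass z (z.length - i - 1)) y).Perm y ∧
    ((List.range y.length).foldl (fun z i => bpass z (z.length - i - 1)) y).Sorted (· ≤ ·) := by
  have := loop_inv y.length y y.length rfl le_rfl
    (by rw [List.drop_length]; exact List.Pairwise.nil)
    (by intro a ha b hb; rw [List.drop_length] at hb; exact absurd hb (List.not_mem_nil))
  simpa [List.range_eq_range', Nat.sub_self] using this

theorem mergeB_perm (u v : List Int) : (mergeB u v).Perm (u ++ v) := by
  fun_induction mergeB u v with
  | case1 v => simp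
  | case2 u h => simp
  | case3 a u b v hab ih => exact ih.cons a
  | case4 a u b v hab ih => exact (ih.cons b).trans List.perm_middle.symm

theorem mergeB_sorted (u v : List Int) (hu : u.Sorted (· ≤ ·)) (hv : v.Sorted (· ≤ ·)) :
    (mergeB u v).Sorted (· ≤ ·) := by
  fun_induction mergeB u v with
  | case1 v => exact hv
  | case2 u h => exact hu
  | case3 a u b v hab ih =>
      rw [List.sorted_cons] at hu ⊢
      refine ⟨?_, ih hu.2 hv⟩
      intro x hx
      have hx' := (mergeB_perm u (b :: v)).mem_iff.mp hx
      rcases List.mem_append.mp hx' with hxu | hxv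
      · exact hu.1 x hxu
      · simp only [List.mem_cons] at hxv
        rcases hxv with rfl | hxv
        · exact hab
        · exact le_trans hab ((List.sorted_cons.mp hv).1 x hxv)
  | case4 a u b v hab ih =>
      rw [List.sorted_cons] at hv ⊢
      refine ⟨?_, ih hu hv.2⟩
      intro x hx
      have hx' := (mergeB_perm (a :: u) v).mem_iff.mp hx
      rcases List.mem_append.mp hx' with hxu | hxv
      · simp only [List.mem_cons] at hxu
        rcases hxu with rfl | hxu
        · omega
        · exact le_trans (by omega) ((List.sorted_cons.mp hu).1 x hxu)
      · exact hv.1 x hxv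

theorem msortB_perm (l : List Int) : (msortB l).Perm l := by
  fun_induction msortB l with
  | case1 l h => exact List.Perm.refl l
  | case2 l h ih1 ih2 =>
      refine (mergeB_perm _ _).trans ?_
      refine (ih1.append ih2).trans ?_
      rw [List.take_append_drop]

theorem msortB_sorted (l : List Int) : (msortB l).Sorted (· ≤ ·) := by
  fun_induction msortB l with
  | case1 l h =>
      rcases l with _ | ⟨a, _ | ⟨b, t⟩⟩
      · exact List.Pairwise.nil
      · exact List.Pairwise.cons (by simp) List.Pairwise.nil
      · exfalso; simp at h
  | case2 l h ih1 ih2 => exact mergeB_sorted _ _ ih1 ih2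

-- ===== VERDICT (by name: the statement is the Claim_ definition above) =====
theorem zlacz_posortowane_spec : Claim_equal_zlacz_posortowane := by
  intro x _
  unfold Spec_zlacz_posortowane zlacz_posortowane zlacz_posortowane_alt
  simp only [flattenA_eq, List.nil_append]
  set y := x.flatMap (fun r => r) with hy
  obtain ⟨hP, hS⟩ := bubble_sorts y
  exact List.Perm.eq_of_pairwise' hS (msortB_sorted y) (hP.trans (msortB_perm y).symm)
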